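-- pv_equiv track=rewrite | github.com/browndw/morph_parser | morph_parser/prep/audit_orthography.py | _is_t_epenthesis_ic
-- ===== SOURCE A (Python) =====
-- from typing import Dict, Iterable, List, Optional
--
-- VOWELS = set("aeiou")
--
-- T_EPENTHESIS_SUFFIXES = {
--     "aceae",
--     "aurant",
--     "azepam",
--     "eer",
--     "er",
--     "ic",
--     "ics",
--     "id",
--     "idae",
--     "ino",
--     "ism",
--     "ist",
--     "ite",
--     "itis",
--     "itude",
--     "ive",
--     "ize",
--     "o",
--     "odea",
--     "oid",
--     "osis",
--     "ous",
--     "ry",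
--     "taste",
--     "tend",
--     "ual",
-- }
--
-- def _is_t_epenthesis_ic(
--
--     diff_ops: Iterable[tuple],
--     boundaries: List[int],
--     segments_lower: List[str],
--     joined_lower: str,
--     word_lower: str,
-- ) -> bool:
--     for op, j1, j2, w1, w2 in diff_ops:
--         if op != "insert":
--             continue
--         inserted = word_lower[w1:w2]
--         if inserted != "t":
--             continue
--         boundary_idx = None
--         for idx, boundary in enumerate(boundaries[:-1]):
--             if j1 == boundary == j2:
--                 boundary_idx = idx
--                 break
--         if boundary_idx is None:
--             continue
--         base_idx = boundary_idx
--         suffix_idx = base_idx + 1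
--         if suffix_idx >= len(segments_lower):
--             continue
--         base_seg = segments_lower[base_idx]
--         if not base_seg or base_seg[-1] not in VOWELS:
--             continue
--         suffix_seg = segments_lower[suffix_idx]
--         if suffix_seg not in T_EPENTHESIS_SUFFIXES:
--             continue
--         return True
--     return False
-- ===== SOURCE B (Python) =====
-- VOWELS = set("aeiou")
--
-- T_EPENTHESIS_SUFFIXES = {
--     "aceae", "aurant", "azepam", "eer", "er", "ic", "ics", "id", "idae",
--     "ino", "ism", "ist", "ite", "itis", "itude", "ive", "ize", "o",
--     "odea", "oid", "osis", "ous", "ry", "taste", "tend", "ual",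
-- }
--
--
-- def _is_t_epenthesis_ic(diff_ops, boundaries, segments_lower, joined_lower, word_lower):
--     # Collect once the positions where some diff op inserts exactly "t".
--     t_positions = {j1 for (op, j1, j2, w1, w2) in diff_ops
--                    if op == "insert" and j1 == j2 and word_lower[w1:w2] == "t"}
--     # Single pass over the boundaries; only the FIRST occurrence of each
--     # boundary value is ever examined (matching the first-match lookup).
--     seen = set()
--     for idx, b in enumerate(boundaries[:-1]):
--         if b in seen:
--             continue
--         seen.add(b)
--         if b not in t_positions:
--             continue
--         if idx + 1 >= len(segments_lower):
--             continue
--         base = segments_lower[idx]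
--         if base and base[-1] in VOWELS and segments_lower[idx + 1] in T_EPENTHESIS_SUFFIXES:
--             return True
--     return False
-- ===== Notes on version B (the rewrite author's own statement) =====
-- stated objective: alternative
-- what changed: A scans boundaries[:-1] from scratch inside every diff-op iteration; B precomputes the set of t-insert positions in one pass over diff_ops, then makes a single pass over boundaries[:-1] with a seen-set so each boundary value is examined only at its first occurrence.
import Mathlib
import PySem

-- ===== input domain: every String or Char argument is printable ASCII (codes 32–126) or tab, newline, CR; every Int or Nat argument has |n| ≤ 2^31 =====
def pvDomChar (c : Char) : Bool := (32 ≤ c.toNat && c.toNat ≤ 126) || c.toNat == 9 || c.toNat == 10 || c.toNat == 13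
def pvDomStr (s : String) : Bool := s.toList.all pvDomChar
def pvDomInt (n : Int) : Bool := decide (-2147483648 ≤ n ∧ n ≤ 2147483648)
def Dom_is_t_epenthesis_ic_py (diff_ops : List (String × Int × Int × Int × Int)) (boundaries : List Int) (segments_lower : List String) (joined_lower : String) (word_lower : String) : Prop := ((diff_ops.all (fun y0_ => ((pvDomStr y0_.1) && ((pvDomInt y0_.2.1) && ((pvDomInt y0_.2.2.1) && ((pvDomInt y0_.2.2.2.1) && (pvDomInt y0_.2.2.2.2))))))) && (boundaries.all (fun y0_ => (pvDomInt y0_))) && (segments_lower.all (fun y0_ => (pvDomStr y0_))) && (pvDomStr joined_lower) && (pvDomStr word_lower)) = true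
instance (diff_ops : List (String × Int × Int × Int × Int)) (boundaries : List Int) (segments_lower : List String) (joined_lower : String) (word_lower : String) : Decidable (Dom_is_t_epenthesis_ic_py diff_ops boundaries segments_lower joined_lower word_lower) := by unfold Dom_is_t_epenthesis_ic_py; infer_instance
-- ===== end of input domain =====

-- B replaces A's per-op rescans of boundaries[:-1] by one precomputed set of t-insert
-- positions plus a single seen-set pass over boundaries[:-1] (alternative decomposition).

-- ===== PORT A =====
def pvVowels : List Char := ['a', 'e', 'i', 'o', 'u']

def pvSuffixes : List String :=
  ["aceae", "aurant", "azepam", "eer", "er", "ic", "ics", "id", "idae",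
   "ino", "ism", "ist", "ite", "itis", "itude", "ive", "ize", "o",
   "odea", "oid", "osis", "ous", "ry", "taste", "tend", "ual"]

-- A's inner loop: first idx in the list with j1 == boundary == j2 (enumerate counter as Nat).
def pvFindBoundaryIdx (j1 j2 : Int) : List Int → Nat → Option Nat
  | [], _ => none
  | b :: rest, idx =>
    if j1 == b && b == j2 then some idx else pvFindBoundaryIdx j1 j2 rest (idx + 1)

def pvLoopA (boundaries' : List Int) (segments_lower : List String) (word_lower : String) :
    List (String × Int × Int × Int × Int) → Bool
  | [] => false
  | (op, j1, j2, w1, w2) :: rest =>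
    if op != "insert" then pvLoopA boundaries' segments_lower word_lower rest
    else
      let inserted := PySem.Str.slice word_lower (some w1) (some w2)
      if inserted != "t" then pvLoopA boundaries' segments_lower word_lower rest
      else
        match pvFindBoundaryIdx j1 j2 boundaries' 0 with
        | none => pvLoopA boundaries' segments_lower word_lower rest
        | some baseIdx =>
          let suffixIdx := baseIdx + 1
          if segments_lower.length ≤ suffixIdx then pvLoopA boundaries' segments_lower word_lower rest
          else
            -- baseIdx < len segments_lower here, so getD is exact (Python never raises)
            let baseSeg := segments_lower.getD baseIdx ""
            match PySem.Str.pyGet? baseSeg (-1) with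
            | none => pvLoopA boundaries' segments_lower word_lower rest  -- base_seg empty
            | some c =>
              if !(pvVowels.contains c) then pvLoopA boundaries' segments_lower word_lower rest
              else
                let suffixSeg := segments_lower.getD suffixIdx ""
                if !(pvSuffixes.contains suffixSeg) then pvLoopA boundaries' segments_lower word_lower rest
                else true

def is_t_epenthesis_ic_py (diff_ops : List (String × Int × Int × Int × Int)) (boundaries : List Int) (segments_lower : List String) (joined_lower : String) (word_lower : String) : Bool :=
  pvLoopA (PySem.List.slice boundaries none (some (-1))) segments_lower word_lower diff_ops

-- ===== PORT B =====
-- the set comprehension over diff_ops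
def pvTPositions (word_lower : String) (diff_ops : List (String × Int × Int × Int × Int)) : PySem.Set Int :=
  PySem.Set.ofList (diff_ops.filterMap (fun t =>
    if t.1 == "insert" && t.2.1 == t.2.2.1 &&
        PySem.Str.slice word_lower (some t.2.2.2.1) (some t.2.2.2.2) == "t"
    then some t.2.1 else none))

-- B's single pass over boundaries[:-1] (enumerate counter as Nat) with the seen-set.
def pvLoopB (tpos : PySem.Set Int) (segments_lower : List String) :
    List Int → Nat → PySem.Set Int → Bool
  | [], _, _ => false
  | b :: rest, idx, seen =>
    if PySem.Set.contains seen b then pvLoopB tpos segments_lower rest (idx + 1) seen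
    else
      let seen' := PySem.Set.add seen b
      if !(PySem.Set.contains tpos b) then pvLoopB tpos segments_lower rest (idx + 1) seen'
      else if segments_lower.length ≤ idx + 1 then pvLoopB tpos segments_lower rest (idx + 1) seen'
      else
        -- idx < len segments_lower here, so getD is exact
        let base := segments_lower.getD idx ""
        let ok :=
          match PySem.Str.pyGet? base (-1) with
          | none => false  -- base empty
          | some c => pvVowels.contains c && pvSuffixes.contains (segments_lower.getD (idx + 1) "")
        if ok then true else pvLoopB tpos segments_lower rest (idx + 1) seen'

def is_t_epenthesis_ic_py_alt (diff_ops : List (String × Int × Int × Int × Int)) (boundaries : List Int) (segments_lower : List String) (joined_lower : String) (word_lower : String) : Bool :=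
  pvLoopB (pvTPositions word_lower diff_ops) segments_lower
    (PySem.List.slice boundaries none (some (-1))) 0 PySem.Set.empty

-- ===== PRECONDITION & SPEC =====
def Spec_is_t_epenthesis_ic_py (diff_ops : List (String × Int × Int × Int × Int)) (boundaries : List Int) (segments_lower : List String) (joined_lower : String) (word_lower : String) (out : Bool) : Prop := out = is_t_epenthesis_ic_py_alt diff_ops boundaries segments_lower joined_lower word_lower
instance (diff_ops : List (String × Int × Int × Int × Int)) (boundaries : List Int) (segments_lower : List String) (joined_lower : String) (word_lower : String) (out : Bool) : Decidable (Spec_is_t_epenthesis_ic_py diff_ops boundaries segments_lower joined_lower word_lower out) := by unfold Spec_is_t_epenthesis_ic_py; infer_instance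

-- ===== CLAIM (what is proved, stated in full; the proofs are below) =====
def Claim_equal_is_t_epenthesis_ic_py : Prop := ∀ (diff_ops : List (String × Int × Int × Int × Int)) (boundaries : List Int) (segments_lower : List String) (joined_lower : String) (word_lower : String), Dom_is_t_epenthesis_ic_py diff_ops boundaries segments_lower joined_lower word_lower → Spec_is_t_epenthesis_ic_py diff_ops boundaries segments_lower joined_lower word_lower (is_t_epenthesis_ic_py diff_ops boundaries segments_lower joined_lower word_lower)

-- ===== LEMMAS AND PROOFS =====

-- the shared per-index check (used only in the proofs)
def pvCheck (segments_lower : List String) (idx : Nat) : Bool :=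
  decide (idx + 1 < segments_lower.length) &&
  (match PySem.Str.pyGet? (segments_lower.getD idx "") (-1) with
   | none => false
   | some c => pvVowels.contains c && pvSuffixes.contains (segments_lower.getD (idx + 1) ""))

def pvQual (word_lower : String) (t : String × Int × Int × Int × Int) : Bool :=
  t.1 == "insert" && t.2.1 == t.2.2.1 &&
    PySem.Str.slice word_lower (some t.2.2.2.1) (some t.2.2.2.2) == "t"

def pvHit (boundaries' : List Int) (segs : List String) (w : String)
    (t : String × Int × Int × Int × Int) : Bool :=
  pvQual w t &&
    (match pvFindBoundaryIdx t.2.1 t.2.2.1 boundaries' 0 with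
     | none => false
     | some i => pvCheck segs i)

theorem pvFindBoundaryIdx_eq_none (j1 j2 : Int) (h : j1 ≠ j2) (l : List Int) (k : Nat) :
    pvFindBoundaryIdx j1 j2 l k = none := by
  induction l generalizing k with
  | nil => rfl
  | cons b rest ih =>
    simp only [pvFindBoundaryIdx]
    have : ¬(j1 == b && b == j2) = true := by
      simp only [Bool.and_eq_true, beq_iff_eq]
      rintro ⟨rfl, rfl⟩; exact h rfl
    simp [this, ih]

theorem pvLoopA_cons (boundaries' : List Int) (segs : List String) (w : String)
    (t : String × Int × Int × Int × Int) (rest : List (String × Int × Int × Int × Int)) :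
    pvLoopA boundaries' segs w (t :: rest) =
      (pvHit boundaries' segs w t || pvLoopA boundaries' segs w rest) := by
  obtain ⟨op, j1, j2, w1, w2⟩ := t
  simp only [pvLoopA, pvHit, pvQual]
  by_cases hop : op = "insert"
  · subst hop
    simp only [bne_self_eq_false, Bool.false_eq_true, if_false, beq_self_eq_true, Bool.true_and]
    by_cases hins : PySem.Str.slice w (some w1) (some w2) = "t"
    · simp only [hins, bne_self_eq_false, Bool.false_eq_true, if_false, beq_self_eq_true,
        Bool.and_true]
      cases hfind : pvFindBoundaryIdx j1 j2 boundaries' 0 with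
      | none => simp
      | some i =>
        have hj : j1 = j2 := by
          by_contra hne
          rw [pvFindBoundaryIdx_eq_none j1 j2 hne] at hfind; cases hfind
        subst hj
        simp only [beq_self_eq_true, Bool.true_and, pvCheck]
        by_cases hlen : segs.length ≤ i + 1
        · have : ¬ (i + 1 < segs.length) := by omega
          simp [hlen, this]
        · have hlt : i + 1 < segs.length := by omega
          simp only [hlen, if_false, decide_eq_true hlt, Bool.true_and]
          cases hget : PySem.Str.pyGet? (segs.getD i "") (-1) with
          | none => simp
          | some c =>
            by_cases hvc : c ∈ pvVowels
            · by_cases hsuf : segs.getD (i + 1) "" ∈ pvSuffixes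
              · simp [hvc, hsuf]
              · simp [hvc]
            · simp [hvc]
    · have h1 : (PySem.Str.slice w (some w1) (some w2) != "t") = true := by simpa using hins
      have h2 : (PySem.Str.slice w (some w1) (some w2) == "t") = false := by simpa using hins
      simp [h1, h2]
  · have h1 : (op != "insert") = true := by simpa using hop
    have h2 : (op == "insert") = false := by simpa using hop
    simp [h1, h2]

theorem pvLoopA_eq_any (boundaries' : List Int) (segs : List String) (w : String)
    (ops : List (String × Int × Int × Int × Int)) :
    pvLoopA boundaries' segs w ops = ops.any (pvHit boundaries' segs w) := by
  induction ops with
  | nil => rfl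
  | cons t rest ih => rw [pvLoopA_cons, ih, List.any_cons]

theorem pvLoopB_cons (tpos : PySem.Set Int) (segs : List String)
    (x : Int) (rest : List Int) (idx : Nat) (seen : PySem.Set Int) :
    pvLoopB tpos segs (x :: rest) idx seen =
      (if PySem.Set.contains seen x then pvLoopB tpos segs rest (idx + 1) seen
       else ((PySem.Set.contains tpos x && pvCheck segs idx) ||
             pvLoopB tpos segs rest (idx + 1) (PySem.Set.add seen x))) := by
  simp only [pvLoopB]
  by_cases hseen : x ∈ seen
  · simp [hseen, PySem.Set.contains_iff]
  · have hseenf : PySem.Set.contains seen x = false := by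
      rw [← Bool.not_eq_true, PySem.Set.contains_iff _ _]; exact hseen
    simp only [hseenf, Bool.false_eq_true, if_false]
    by_cases htp : x ∈ tpos
    · have htpt : PySem.Set.contains tpos x = true := (PySem.Set.contains_iff _ _).mpr htp
      simp only [htpt, Bool.not_true, Bool.false_eq_true, if_false, Bool.true_and, pvCheck]
      by_cases hlen : segs.length ≤ idx + 1
      · have : ¬ (idx + 1 < segs.length) := by omega
        simp [hlen, this]
      · have hlt : idx + 1 < segs.length := by omega
        simp only [hlen, if_false, decide_eq_true hlt, Bool.true_and]
        cases hget : PySem.Str.pyGet? (segs.getD idx "") (-1) with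
        | none => simp
        | some c =>
          by_cases hvc : c ∈ pvVowels
          · by_cases hsuf : segs.getD (idx + 1) "" ∈ pvSuffixes
            · simp [hvc, hsuf]
            · simp [hvc]
          · simp [hvc]
    · have htpf : PySem.Set.contains tpos x = false := by
        rw [← Bool.not_eq_true, PySem.Set.contains_iff _ _]; exact htp
      simp [htpf, htp]

theorem pvLoopB_iff (tpos : PySem.Set Int) (segs : List String)
    (l : List Int) (idx : Nat) (seen : PySem.Set Int) :
    pvLoopB tpos segs l idx seen = true ↔
      ∃ b i, PySem.Set.contains seen b = false ∧ PySem.Set.contains tpos b = true ∧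
        pvFindBoundaryIdx b b l idx = some i ∧ pvCheck segs i = true := by
  induction l generalizing idx seen with
  | nil => simp [pvLoopB, pvFindBoundaryIdx]
  | cons x rest ih =>
    have hfx : ∀ b : Int, b ≠ x →
        pvFindBoundaryIdx b b (x :: rest) idx = pvFindBoundaryIdx b b rest (idx + 1) := by
      intro b hb
      simp only [pvFindBoundaryIdx]
      have : ¬(b == x && x == b) = true := by
        simp only [Bool.and_eq_true, beq_iff_eq]; rintro ⟨rfl, _⟩; exact hb rfl
      simp [this]
    have hfxx : pvFindBoundaryIdx x x (x :: rest) idx = some idx := by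
      simp [pvFindBoundaryIdx]
    rw [pvLoopB_cons]
    by_cases hseen : PySem.Set.contains seen x = true
    · rw [if_pos hseen, ih]
      constructor
      · rintro ⟨b, i, hns, ht, hf, hc⟩
        have hbx : b ≠ x := by rintro rfl; rw [hseen] at hns; cases hns
        exact ⟨b, i, hns, ht, by rw [hfx b hbx]; exact hf, hc⟩
      · rintro ⟨b, i, hns, ht, hf, hc⟩
        have hbx : b ≠ x := by rintro rfl; rw [hseen] at hns; cases hns
        rw [hfx b hbx] at hf
        exact ⟨b, i, hns, ht, hf, hc⟩
    · have hseenf : PySem.Set.contains seen x = false := eq_false_of_ne_true hseen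
      rw [if_neg hseen]
      have hseen' : ∀ b : Int, PySem.Set.contains (PySem.Set.add seen x) b = false ↔
          (b ≠ x ∧ PySem.Set.contains seen b = false) := by
        intro b
        rw [← Bool.not_eq_true, ← Bool.not_eq_true (PySem.Set.contains seen b),
          PySem.Set.contains_iff, PySem.Set.contains_iff, PySem.Set.mem_add]
        constructor
        · intro h
          exact ⟨fun hbx => h (Or.inr hbx), fun hm => h (Or.inl hm)⟩
        · rintro ⟨hbx, hm⟩ (h | h)
          · exact hm h
          · exact hbx h
      have htail : pvLoopB tpos segs rest (idx + 1) (PySem.Set.add seen x) = true ↔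
          ∃ b i, (b ≠ x ∧ PySem.Set.contains seen b = false) ∧
            PySem.Set.contains tpos b = true ∧
            pvFindBoundaryIdx b b rest (idx + 1) = some i ∧ pvCheck segs i = true := by
        rw [ih]
        constructor
        · rintro ⟨b, i, hns, ht, hf, hc⟩; exact ⟨b, i, (hseen' b).mp hns, ht, hf, hc⟩
        · rintro ⟨b, i, hns, ht, hf, hc⟩; exact ⟨b, i, (hseen' b).mpr hns, ht, hf, hc⟩
      rw [Bool.or_eq_true, htail]
      constructor
      · rintro (hcond | ⟨b, i, hns, ht, hf, hc⟩)
        · rw [Bool.and_eq_true] at hcond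
          exact ⟨x, idx, hseenf, hcond.1, hfxx, hcond.2⟩
        · exact ⟨b, i, hns.2, ht, by rw [hfx b hns.1]; exact hf, hc⟩
      · rintro ⟨b, i, hns, ht, hf, hc⟩
        by_cases hbx : b = x
        · subst hbx
          rw [hfxx] at hf
          cases hf
          exact Or.inl (by simp [hc, (PySem.Set.contains_iff _ _).mp ht])
        · rw [hfx b hbx] at hf
          exact Or.inr ⟨b, i, ⟨hbx, hns⟩, ht, hf, hc⟩

theorem pvHit_iff (boundaries' : List Int) (segs : List String) (w : String)
    (t : String × Int × Int × Int × Int) :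
    pvHit boundaries' segs w t = true ↔
      pvQual w t = true ∧
        ∃ i, pvFindBoundaryIdx t.2.1 t.2.2.1 boundaries' 0 = some i ∧ pvCheck segs i = true := by
  simp only [pvHit, Bool.and_eq_true]
  cases hfind : pvFindBoundaryIdx t.2.1 t.2.2.1 boundaries' 0 with
  | none => simp
  | some i => simp

theorem pvTPositions_contains (w : String) (ops : List (String × Int × Int × Int × Int)) (b : Int) :
    PySem.Set.contains (pvTPositions w ops) b = true ↔
      ∃ t ∈ ops, pvQual w t = true ∧ t.2.1 = b := by
  simp only [pvTPositions, PySem.Set.contains_iff, PySem.Set.mem_ofList,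
    List.mem_filterMap, pvQual]
  constructor
  · rintro ⟨t, ht, hif⟩
    split at hif
    · rename_i hcond
      cases hif
      exact ⟨t, ht, hcond, rfl⟩
    · cases hif
  · rintro ⟨t, ht, hq, rfl⟩
    exact ⟨t, ht, by rw [if_pos hq]⟩

-- ===== VERDICT (by name: the statement is the Claim_ definition above) =====
theorem is_t_epenthesis_ic_py_spec : Claim_equal_is_t_epenthesis_ic_py := by
  intro diff_ops boundaries segments_lower joined_lower word_lower _
  unfold Spec_is_t_epenthesis_ic_py is_t_epenthesis_ic_py is_t_epenthesis_ic_py_alt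
  set bs' := PySem.List.slice boundaries none (some (-1)) with hbs
  have hiff : pvLoopA bs' segments_lower word_lower diff_ops = true ↔
      pvLoopB (pvTPositions word_lower diff_ops) segments_lower bs' 0 PySem.Set.empty = true := by
    rw [pvLoopA_eq_any, List.any_eq_true, pvLoopB_iff]
    constructor
    · rintro ⟨t, ht, hhit⟩
      obtain ⟨hq, i, hf, hc⟩ := (pvHit_iff bs' segments_lower word_lower t).mp hhit
      have hj : t.2.1 = t.2.2.1 := by
        simp only [pvQual, Bool.and_eq_true, beq_iff_eq] at hq
        exact hq.1.2
      refine ⟨t.2.1, i, ?_, ?_, ?_, hc⟩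
      · rfl
      · exact (pvTPositions_contains word_lower diff_ops t.2.1).mpr ⟨t, ht, hq, rfl⟩
      · rw [← hj] at hf; exact hf
    · rintro ⟨b, i, _, htp, hf, hc⟩
      obtain ⟨t, ht, hq, hb⟩ := (pvTPositions_contains word_lower diff_ops b).mp htp
      have hj : t.2.1 = t.2.2.1 := by
        simp only [pvQual, Bool.and_eq_true, beq_iff_eq] at hq
        exact hq.1.2
      refine ⟨t, ht, (pvHit_iff bs' segments_lower word_lower t).mpr ⟨hq, i, ?_, hc⟩⟩
      rw [← hj, hb]
      exact hf
  cases hA' : pvLoopA bs' segments_lower word_lower diff_ops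
  · cases hB' : pvLoopB (pvTPositions word_lower diff_ops) segments_lower bs' 0 PySem.Set.empty
    · rfl
    · rw [hA', hB'] at hiff; exact absurd (hiff.mpr rfl) (by simp)
  · exact (hiff.mp hA').symm
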